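-- pv_equiv track=rewrite | github.com/JeanWoinaroski/ProjetoGamePython | src/world/map.py | generate_tile_data
-- ===== SOURCE A (Python) =====
-- def generate_tile_data(cols, rows, border_tile=1, floor_tile=0, feature_tile=2):
--     """Gera um mapa retangular simples (bordas são paredes)."""
--     data = []
--     for r in range(rows):
--         row = []
--         for c in range(cols):
--             if r == 0 or r == rows - 1 or c == 0 or c == cols - 1:
--                 row.append(border_tile)
--             else:
--                 # cria variação simples: 1 em padrão x/y para cabo de água
--                 if (r % 2 == 0 and c % 2 == 0) and (r > 1 and c > 1):
--                     row.append(feature_tile)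
--                 else:
--                     row.append(floor_tile)
--         data.append(row)
--     return data
-- ===== SOURCE B (Python) =====
-- def generate_tile_data(cols, rows, border_tile=1, floor_tile=0, feature_tile=2):
--     """Gera um mapa retangular simples (bordas são paredes)."""
--     # floor everywhere, then stamp features on even interior indices, then paint borders last
--     data = [[floor_tile] * cols for _ in range(rows)]
--     if rows > 0 and cols > 0:
--         for r in range(2, rows - 1, 2):
--             for c in range(2, cols - 1, 2):
--                 data[r][c] = feature_tile
--         full = [border_tile] * cols
--         data[0] = list(full)
--         data[-1] = list(full)
--         for row in data:
--             row[0] = border_tile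
--             row[-1] = border_tile
--     return data
-- ===== Notes on version B (the rewrite author's own statement) =====
-- stated objective: faster
-- what changed: A decides each cell with a per-cell three-way branch inside nested Python loops; B builds the whole floor grid with list repetition, stamps feature tiles with strided loops over only the even interior indices, and overwrites the borders last, so the per-cell Python-level branch work disappears.
import Mathlib
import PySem

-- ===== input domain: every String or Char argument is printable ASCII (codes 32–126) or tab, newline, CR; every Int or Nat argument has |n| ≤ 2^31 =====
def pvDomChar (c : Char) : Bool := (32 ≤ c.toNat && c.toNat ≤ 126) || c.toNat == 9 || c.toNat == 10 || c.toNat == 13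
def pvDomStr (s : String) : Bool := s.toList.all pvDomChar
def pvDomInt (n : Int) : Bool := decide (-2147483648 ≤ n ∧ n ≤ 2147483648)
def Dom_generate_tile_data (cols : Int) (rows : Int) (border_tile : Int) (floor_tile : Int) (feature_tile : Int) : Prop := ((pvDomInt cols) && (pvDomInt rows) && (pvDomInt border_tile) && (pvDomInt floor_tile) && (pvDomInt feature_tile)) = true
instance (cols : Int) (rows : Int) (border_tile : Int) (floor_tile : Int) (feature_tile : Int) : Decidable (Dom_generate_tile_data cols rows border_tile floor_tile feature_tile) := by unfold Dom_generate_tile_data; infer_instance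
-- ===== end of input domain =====

-- B replaces A's per-cell three-way branch with three passes (floor grid, strided feature stamp, border overwrite last); same results, measured constant-factor faster.

-- ===== PORT A =====
def generate_tile_data (cols : Int) (rows : Int) (border_tile : Int) (floor_tile : Int) (feature_tile : Int) : List (List Int) :=
  (PySem.List.pyRange 0 rows 1).foldl (fun data r =>
    data ++ [ (PySem.List.pyRange 0 cols 1).foldl (fun row c =>
      row ++ [ if r = 0 ∨ r = rows - 1 ∨ c = 0 ∨ c = cols - 1 then border_tile
               else if (PySem.Int.mod r 2 = 0 ∧ PySem.Int.mod c 2 = 0) ∧ (1 < r ∧ 1 < c) then feature_tile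
               else floor_tile ]) [] ]) []

-- ===== PORT B =====
def generate_tile_data_alt (cols : Int) (rows : Int) (border_tile : Int) (floor_tile : Int) (feature_tile : Int) : List (List Int) :=
  let data := (PySem.List.pyRange 0 rows 1).map (fun _ => List.replicate cols.toNat floor_tile)
  if 0 < rows ∧ 0 < cols then
    let data := (PySem.List.pyRange 2 (rows - 1) 2).foldl (fun d r =>
      d.set r.toNat ((PySem.List.pyRange 2 (cols - 1) 2).foldl
        (fun row c => row.set c.toNat feature_tile) (d.getD r.toNat []))) data
    let full := List.replicate cols.toNat border_tile
    let data := data.set 0 full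
    let data := data.set (rows - 1).toNat full
    data.map (fun row => (row.set 0 border_tile).set (cols - 1).toNat border_tile)
  else data

-- ===== PRECONDITION & SPEC =====
def Spec_generate_tile_data (cols : Int) (rows : Int) (border_tile : Int) (floor_tile : Int) (feature_tile : Int) (out : List (List Int)) : Prop := out = generate_tile_data_alt cols rows border_tile floor_tile feature_tile
instance (cols : Int) (rows : Int) (border_tile : Int) (floor_tile : Int) (feature_tile : Int) (out : List (List Int)) : Decidable (Spec_generate_tile_data cols rows border_tile floor_tile feature_tile out) := by unfold Spec_generate_tile_data; infer_instance

-- ===== CLAIM (what is proved, stated in full; the proofs are below) =====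
def Claim_equal_generate_tile_data : Prop := ∀ (cols : Int) (rows : Int) (border_tile : Int) (floor_tile : Int) (feature_tile : Int), Dom_generate_tile_data cols rows border_tile floor_tile feature_tile → Spec_generate_tile_data cols rows border_tile floor_tile feature_tile (generate_tile_data cols rows border_tile floor_tile feature_tile)

-- ===== LEMMAS AND PROOFS =====

-- A's cell value as a function of the (Int) coordinates
def pvTile (cols rows border_tile floor_tile feature_tile : Int) (r c : Int) : Int :=
  if r = 0 ∨ r = rows - 1 ∨ c = 0 ∨ c = cols - 1 then border_tile
  else if (PySem.Int.mod r 2 = 0 ∧ PySem.Int.mod c 2 = 0) ∧ (1 < r ∧ 1 < c) then feature_tile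
  else floor_tile

lemma pvA_eq (cols rows bt ft fe : Int) :
    generate_tile_data cols rows bt ft fe =
      (PySem.List.pyRange 0 rows 1).map (fun r =>
        (PySem.List.pyRange 0 cols 1).map (fun c => pvTile cols rows bt ft fe r c)) := by
  simp only [generate_tile_data, pvTile, PySem.List.foldl_append_singleton_eq_map,
    List.nil_append]

lemma pv_foldl_set_length {α : Type} (l : List Int) (row : List α) (v : α) :
    (l.foldl (fun r c => r.set c.toNat v) row).length = row.length := by
  induction l generalizing row with
  | nil => rfl
  | cons c l ih => simpa using ih (row.set c.toNat v)

lemma pv_foldl_set_getElem? {α : Type} (l : List Int) (row : List α) (v : α) (j : Nat)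
    (hnn : ∀ x ∈ l, 0 ≤ x) :
    (l.foldl (fun r c => r.set c.toNat v) row)[j]? =
      if (j : Int) ∈ l ∧ j < row.length then some v else row[j]? := by
  induction l generalizing row with
  | nil => simp
  | cons c l ih =>
    have hc : 0 ≤ c := hnn c List.mem_cons_self
    have hnn' : ∀ x ∈ l, 0 ≤ x := fun x hx => hnn x (List.mem_cons_of_mem _ hx)
    rw [List.foldl_cons, ih _ hnn', List.length_set]
    by_cases hjlen : j < row.length
    · by_cases hmem : (j : Int) ∈ l
      · rw [if_pos ⟨hmem, hjlen⟩, if_pos ⟨List.mem_cons_of_mem _ hmem, hjlen⟩]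
      · rw [if_neg (by tauto)]
        by_cases hcj : (j : Int) = c
        · have hct : c.toNat = j := by omega
          rw [List.getElem?_set, if_pos hct, if_pos (by omega),
            if_pos ⟨List.mem_cons.mpr (Or.inl hcj), hjlen⟩]
        · rw [List.getElem?_set_ne (by omega),
            if_neg (fun hcon => (List.mem_cons.mp hcon.1).elim hcj hmem)]
    · simp only [hjlen, and_false, if_false]
      rw [List.getElem?_eq_none (by simp; omega), List.getElem?_eq_none (by omega)]

lemma pv_foldl_setmod_length {α : Type} (l : List Int) (d : List α) (g : α → α) (dflt : α) :
    (l.foldl (fun d r => d.set r.toNat (g (d.getD r.toNat dflt))) d).length = d.length := by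
  induction l generalizing d with
  | nil => rfl
  | cons r l ih => simpa using ih (d.set r.toNat (g (d.getD r.toNat dflt)))

lemma pv_foldl_setmod_getElem? {α : Type} (l : List Int) (d : List α) (g : α → α) (dflt e : α)
    (j : Nat)
    (hnn : ∀ x ∈ l, 0 ≤ x)
    (hinv : ∀ i : Nat, i < d.length → d[i]? = some e ∨ d[i]? = some (g e))
    (hid : g (g e) = g e) :
    (l.foldl (fun d r => d.set r.toNat (g (d.getD r.toNat dflt))) d)[j]? =
      if (j : Int) ∈ l ∧ j < d.length then some (g e) else d[j]? := by
  induction l generalizing d with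
  | nil => simp
  | cons r l ih =>
    have hr : 0 ≤ r := hnn r List.mem_cons_self
    have hnn' : ∀ x ∈ l, 0 ≤ x := fun x hx => hnn x (List.mem_cons_of_mem _ hx)
    set d' := d.set r.toNat (g (d.getD r.toNat dflt)) with hd'
    have hlen' : d'.length = d.length := by simp [hd']
    have hval : r.toNat < d.length → g (d.getD r.toNat dflt) = g e := by
      intro h
      rcases hinv r.toNat h with h1 | h1 <;>
        simp [List.getD, h1, hid]
    have hinv' : ∀ i : Nat, i < d'.length → d'[i]? = some e ∨ d'[i]? = some (g e) := by
      intro i hi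
      rw [hlen'] at hi
      by_cases hir : r.toNat = i
      · right
        subst hir
        rw [hd', List.getElem?_set, if_pos rfl, if_pos hi, hval hi]
      · rw [hd', List.getElem?_set_ne hir]
        exact hinv i hi
    rw [List.foldl_cons, ← hd', ih d' hnn' hinv', hlen']
    by_cases hjlen : j < d.length
    · by_cases hmem : (j : Int) ∈ l
      · rw [if_pos ⟨hmem, hjlen⟩, if_pos ⟨List.mem_cons_of_mem _ hmem, hjlen⟩]
      · rw [if_neg (by tauto)]
        by_cases hjr : (j : Int) = r
        · have hrj : r.toNat = j := by omega
          rw [if_pos ⟨List.mem_cons.mpr (Or.inl hjr), hjlen⟩,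
            hd', List.getElem?_set, if_pos hrj, if_pos (by omega), hval (by omega)]
        · rw [if_neg (fun hcon => (List.mem_cons.mp hcon.1).elim hjr hmem),
            hd', List.getElem?_set_ne (by omega)]
    · simp only [hjlen, and_false, if_false]
      rw [List.getElem?_eq_none (by omega), List.getElem?_eq_none (by omega)]

lemma pv_mem_pyRange_two (a b x : Int) :
    x ∈ PySem.List.pyRange a b 2 ↔ a ≤ x ∧ x < b ∧ x % 2 = a % 2 := by
  rw [PySem.List.mem_pyRange_iff_of_pos (by norm_num)]
  constructor
  · rintro ⟨h1, h2, k, hk⟩; exact ⟨h1, h2, by omega⟩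
  · rintro ⟨h1, h2, h3⟩; exact ⟨h1, h2, ⟨(x - a) / 2, by omega⟩⟩

lemma pv_mod_cast (j : Nat) : PySem.Int.mod (↑j) 2 = ↑(j % 2) := by
  rw [PySem.Int.mod_eq_emod_of_pos (by norm_num)]
  omega

theorem generate_tile_data_spec : Claim_equal_generate_tile_data := by
  intro cols rows bt ft fe _
  unfold Spec_generate_tile_data
  rw [pvA_eq, generate_tile_data_alt]
  by_cases hpos : 0 < rows ∧ 0 < cols
  case neg =>
    -- degenerate: no feature/border pass; every A-row is the floor row (or everything is empty)
    simp only [if_neg hpos]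
    apply List.map_congr_left
    intro r hr
    rcases not_and_or.mp hpos with h | h
    · exfalso
      rw [PySem.List.mem_pyRange_one] at hr
      omega
    · rw [show PySem.List.pyRange 0 cols 1 = [] from
        PySem.List.pyRange_one_eq_nil (by omega)]
      simp [show cols.toNat = 0 by omega]
  case pos =>
    obtain ⟨hr0, hc0⟩ := hpos
    simp only [if_pos (⟨hr0, hc0⟩ : 0 < rows ∧ 0 < cols)]
    set rn := rows.toNat with hrn
    set cn := cols.toNat with hcn
    set rowF := List.replicate cn ft with hrowF
    set full := List.replicate cn bt with hfull
    set g : List Int → List Int := fun row =>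
      (PySem.List.pyRange 2 (cols - 1) 2).foldl (fun row c => row.set c.toNat fe) row
      with hg
    set d0 := (PySem.List.pyRange 0 rows 1).map (fun _ => rowF) with hd0
    have hlen0 : d0.length = rn := by
      simp only [hd0, List.length_map, PySem.List.length_pyRange_one, hrn]
      omega
    -- value of a stamped row
    have hstamp : ∀ (row : List Int) (j : Nat),
        (g row)[j]? =
          if 2 ≤ (j : Int) ∧ (j : Int) < cols - 1 ∧ j % 2 = 0 ∧ j < row.length then some fe
          else row[j]? := by
      intro row j
      rw [hg]
      rw [pv_foldl_set_getElem? _ row fe j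
        (by intro x hx; rw [pv_mem_pyRange_two] at hx; omega)]
      exact if_congr (by rw [pv_mem_pyRange_two]; omega) rfl rfl
    have hglen : ∀ row : List Int, (g row).length = row.length := by
      intro row; rw [hg]; exact pv_foldl_set_length _ _ _
    have hgg : g (g rowF) = g rowF := by
      apply List.ext_getElem?
      intro j
      rw [hstamp, hstamp, hglen]
      split_ifs <;> rfl
    -- the grid after the feature pass
    set d1 := (PySem.List.pyRange 2 (rows - 1) 2).foldl
      (fun d r => d.set r.toNat (g (d.getD r.toNat []))) d0 with hd1
    have hd1get : ∀ j : Nat,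
        d1[j]? = if 2 ≤ (j : Int) ∧ (j : Int) < rows - 1 ∧ j % 2 = 0 ∧ j < rn
          then some (g rowF) else d0[j]? := by
      intro j
      rw [hd1, pv_foldl_setmod_getElem? _ d0 g [] rowF j
        (by intro x hx; rw [pv_mem_pyRange_two] at hx; omega)
        (by intro i hi
            left
            rw [hlen0] at hi
            rw [hd0, List.getElem?_map, PySem.List.getElem?_pyRange_one,
              if_pos (by omega)]
            rfl)
        hgg]
      rw [hlen0]
      exact if_congr (by rw [pv_mem_pyRange_two]; omega) rfl rfl
    have hlen1 : d1.length = rn := by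
      rw [hd1, pv_foldl_setmod_length, hlen0]
    have hd0get : ∀ j : Nat, j < rn → d0[j]? = some rowF := by
      intro j hj
      rw [hd0, List.getElem?_map, PySem.List.getElem?_pyRange_one, if_pos (by omega)]
      rfl
    -- row values of A's map form
    have hArow : ∀ (r : Int) (k : Nat),
        ((PySem.List.pyRange 0 cols 1).map (fun c => pvTile cols rows bt ft fe r c))[k]? =
          if k < cn then some (pvTile cols rows bt ft fe r ↑k) else none := by
      intro r k
      rw [List.getElem?_map, PySem.List.getElem?_pyRange_one]
      by_cases hk : k < cn
      · rw [if_pos (by omega), if_pos hk]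
        simp
      · rw [if_neg (by omega), if_neg hk]
        rfl
    -- column values after the border pass on a row x of length cn
    have hB : ∀ (x : List Int) (k : Nat), x.length = cn →
        ((x.set 0 bt).set (cols - 1).toNat bt)[k]? =
          if k < cn then (if k = 0 ∨ k = cn - 1 then some bt else x[k]?) else none := by
      intro x k hx
      have hct : (cols - 1).toNat = cn - 1 := by omega
      rw [hct, List.getElem?_set, List.length_set, hx]
      by_cases hk : k < cn
      · by_cases h1 : cn - 1 = k
        · rw [if_pos h1, if_pos hk, if_pos (show cn - 1 < cn by omega),
            if_pos (Or.inr h1.symm)]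
        · rw [if_neg h1, List.getElem?_set, hx]
          by_cases h0 : k = 0
          · rw [if_pos h0.symm, if_pos hk, if_pos (show (0:Nat) < cn by omega),
              if_pos (Or.inl h0)]
          · rw [if_neg (fun h => h0 h.symm), if_pos hk, if_neg (by omega)]
      · rw [if_neg hk]
        have hknt : ¬ (cn - 1 = k) := by omega
        rw [if_neg hknt, List.getElem?_set_ne (by omega),
          List.getElem?_eq_none (by omega)]
    -- the three possible result rows, compared with A's corresponding row
    have hborderrow : ∀ j : Nat, ((j:Int) = 0 ∨ (j:Int) = rows - 1) →
        (PySem.List.pyRange 0 cols 1).map (fun c => pvTile cols rows bt ft fe ↑j c) =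
          (full.set 0 bt).set (cols - 1).toNat bt := by
      intro j hjb
      apply List.ext_getElem?
      intro k
      rw [hArow, hB full k (by simp [hfull])]
      by_cases hk : k < cn
      · rw [if_pos hk, if_pos hk, pvTile, if_pos (by omega)]
        by_cases hkb : k = 0 ∨ k = cn - 1
        · rw [if_pos hkb]
        · rw [if_neg hkb, hfull, List.getElem?_replicate, if_pos hk]
      · rw [if_neg hk, if_neg hk]
    have hfeatrow : ∀ j : Nat, (2 ≤ (j:Int) ∧ (j:Int) < rows - 1 ∧ j % 2 = 0) →
        (PySem.List.pyRange 0 cols 1).map (fun c => pvTile cols rows bt ft fe ↑j c) =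
          ((g rowF).set 0 bt).set (cols - 1).toNat bt := by
      intro j hjf
      apply List.ext_getElem?
      intro k
      rw [hArow, hB (g rowF) k (by rw [hglen]; simp [hrowF])]
      by_cases hk : k < cn
      · rw [if_pos hk, if_pos hk]
        by_cases hkb : k = 0 ∨ k = cn - 1
        · rw [if_pos hkb, pvTile, if_pos (by omega)]
        · rw [if_neg hkb, hstamp, hrowF, List.length_replicate,
            List.getElem?_replicate, if_pos hk, pvTile, pv_mod_cast, pv_mod_cast,
            if_neg (by omega)]
          by_cases hkf : 2 ≤ (k:Int) ∧ (k:Int) < cols - 1 ∧ k % 2 = 0 ∧ k < cn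
          · rw [if_pos (by omega), if_pos (by omega)]
          · rw [if_neg (by omega), if_neg (by omega)]
      · rw [if_neg hk, if_neg hk]
    have hfloorrow : ∀ j : Nat, j < rn → j ≠ 0 → j ≠ rn - 1 →
        ¬ (2 ≤ (j:Int) ∧ (j:Int) < rows - 1 ∧ j % 2 = 0 ∧ j < rn) →
        (PySem.List.pyRange 0 cols 1).map (fun c => pvTile cols rows bt ft fe ↑j c) =
          (rowF.set 0 bt).set (cols - 1).toNat bt := by
      intro j hj hj0 hj1 hjf
      apply List.ext_getElem?
      intro k
      rw [hArow, hB rowF k (by simp [hrowF])]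
      by_cases hk : k < cn
      · rw [if_pos hk, if_pos hk]
        by_cases hkb : k = 0 ∨ k = cn - 1
        · rw [if_pos hkb, pvTile, if_pos (by omega)]
        · rw [if_neg hkb, hrowF, List.getElem?_replicate, if_pos hk,
            pvTile, pv_mod_cast, pv_mod_cast, if_neg (by omega), if_neg (by omega)]
      · rw [if_neg hk, if_neg hk]
    -- elementwise comparison of the grids
    apply List.ext_getElem?
    intro j
    by_cases hj : j < rn
    case neg =>
      rw [List.getElem?_eq_none, List.getElem?_eq_none]
      · simp only [List.length_map, List.length_set, hlen1]
        omega
      · simp only [List.length_map, PySem.List.length_pyRange_one]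
        omega
    case pos =>
      -- left side: A's row j
      rw [List.getElem?_map, PySem.List.getElem?_pyRange_one, if_pos (by omega)]
      simp only [Option.map_some, zero_add]
      -- right side: B's row j
      rw [List.getElem?_map, List.getElem?_set, List.getElem?_set, List.length_set,
        hlen1, hd1get, hd0get j hj]
      have htn : (rows - 1).toNat = rn - 1 := by omega
      rw [htn]
      by_cases h1 : rn - 1 = j
      · rw [if_pos h1, if_pos (by omega : rn - 1 < rn)]
        exact congrArg some (hborderrow j (by omega))
      · rw [if_neg h1]
        by_cases h2 : (0:Nat) = j
        · rw [if_pos h2, if_pos (by omega : (0:Nat) < rn)]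
          exact congrArg some (hborderrow j (by omega))
        · rw [if_neg h2]
          by_cases hjf : 2 ≤ (j:Int) ∧ (j:Int) < rows - 1 ∧ j % 2 = 0 ∧ j < rn
          · rw [if_pos hjf]
            exact congrArg some (hfeatrow j (by omega))
          · rw [if_neg hjf]
            exact congrArg some (hfloorrow j hj (by omega) (by omega) hjf)
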